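-- pv_equiv track=rewrite | github.com/velesnitski/zbbx-mcp | src/zbbx_mcp/tools/health.py | _bucket_problems_by_age
-- ===== SOURCE A (Python) =====
-- _AGE_BUCKETS: tuple[tuple[str, int], ...] = (
--     ("<1d", 86400),
--     ("1-3d", 3 * 86400),
--     ("3-7d", 7 * 86400),
-- )
--
-- _AGE_BUCKET_KEYS: tuple[str, ...] = ("<1d", "1-3d", "3-7d", "7d+")
--
-- def _bucket_problems_by_age(
--     problems: list[dict],
--     now: int,
-- ) -> dict[int, dict[str, int]]:
--     """Bucket problems by age within each severity.
--
--     Each input record needs ``severity`` (int 0-5) and ``clock`` (int epoch).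
--     Returns ``{severity: {bucket_key: count}}`` with every bucket key
--     present (zero when empty) so consumers can render fixed columns.
--     """
--     by_sev: dict[int, dict[str, int]] = {}
--     for p in problems:
--         try:
--             sev = int(p.get("severity", 0))
--             clock = int(p.get("clock", 0))
--         except (ValueError, TypeError):
--             continue
--         if clock <= 0:
--             continue
--         age = now - clock
--         bucket = _AGE_BUCKET_KEYS[-1]
--         for key, threshold in _AGE_BUCKETS:
--             if age < threshold:
--                 bucket = key
--                 break
--         slot = by_sev.setdefault(sev, dict.fromkeys(_AGE_BUCKET_KEYS, 0))
--         slot[bucket] += 1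
--     return by_sev
-- ===== SOURCE B (Python) =====
-- def _bucket_problems_by_age(
--     problems: list[dict],
--     now: int,
-- ) -> dict[int, dict[str, int]]:
--     """Staged passes: extract valid (severity, age) pairs, then per severity
--     count ages below each cumulative threshold and take differences; no record
--     is ever assigned an individual bucket label."""
--     ages: list[tuple[int, int]] = []
--     for p in problems:
--         try:
--             sev = int(p.get("severity", 0))
--             clock = int(p.get("clock", 0))
--         except (ValueError, TypeError):
--             continue
--         if clock > 0:
--             ages.append((sev, now - clock))
--
--     order = list(dict.fromkeys(s for s, _ in ages))
--
--     def row(s: int) -> dict[str, int]: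
--         sa = [a for t, a in ages if t == s]
--         c1 = sum(1 for a in sa if a < 86400)
--         c2 = sum(1 for a in sa if a < 259200)
--         c3 = sum(1 for a in sa if a < 604800)
--         return {"<1d": c1, "1-3d": c2 - c1, "3-7d": c3 - c2, "7d+": len(sa) - c3}
--
--     return {s: row(s) for s in order}
-- ===== Notes on version B (the rewrite author's own statement) =====
-- stated objective: alternative
-- what changed: A classifies each record into a bucket with a break-loop and increments a per-severity nested dict in place; B never labels any record: it extracts (severity, age) pairs, derives the first-seen severity order, and for each severity computes the four bucket counts as differences of cumulative below-threshold counts over that severity's ages.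
import Mathlib
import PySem

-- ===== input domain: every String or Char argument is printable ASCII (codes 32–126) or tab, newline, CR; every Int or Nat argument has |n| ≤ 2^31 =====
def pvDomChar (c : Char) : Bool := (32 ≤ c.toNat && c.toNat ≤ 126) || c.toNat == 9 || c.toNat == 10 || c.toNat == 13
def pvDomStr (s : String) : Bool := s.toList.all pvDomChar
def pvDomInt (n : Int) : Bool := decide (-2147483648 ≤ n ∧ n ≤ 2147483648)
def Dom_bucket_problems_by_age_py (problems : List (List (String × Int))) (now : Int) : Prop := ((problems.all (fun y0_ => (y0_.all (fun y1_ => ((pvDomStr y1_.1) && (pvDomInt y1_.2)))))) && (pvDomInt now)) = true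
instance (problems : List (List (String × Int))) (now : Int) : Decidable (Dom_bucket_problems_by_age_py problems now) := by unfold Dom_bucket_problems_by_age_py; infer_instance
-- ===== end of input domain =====

-- B replaces A's per-record bucket classification into nested per-severity dicts by
-- staged passes that count ages below cumulative thresholds and take differences;
-- objective: alternative decomposition (same linear cost up to the ≤6 severities).
-- A returns normally on every well-typed input, so there is no Pre_.

-- ===== PORT A =====
-- module constants _AGE_BUCKETS and _AGE_BUCKET_KEYS
def pvAgeBuckets : List (String × Int) := [("<1d", 86400), ("1-3d", 3 * 86400), ("3-7d", 7 * 86400)]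
def pvAgeBucketKeys : List String := ["<1d", "1-3d", "3-7d", "7d+"]

-- inner loop 'bucket = KEYS[-1]; for key, threshold in _AGE_BUCKETS: if age < threshold: bucket = key; break'
def pvFindBucket (age : Int) : List (String × Int) → String
  | [] => "7d+"
  | (key, threshold) :: rest => if age < threshold then key else pvFindBucket age rest

-- one iteration of A's loop over `problems`
def pvStepA (now : Int) (d : PySem.Dict Int (PySem.Dict String Int)) (p : List (String × Int)) :
    PySem.Dict Int (PySem.Dict String Int) :=
  let sev := (PySem.Dict.ofList p).getD "severity" 0    -- int(p.get("severity", 0)); values are ints, so int() never raises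
  let clock := (PySem.Dict.ofList p).getD "clock" 0
  if clock ≤ 0 then d
  else
    let age := now - clock
    let bucket := pvFindBucket age pvAgeBuckets
    let d' := d.setdefault sev (PySem.Dict.ofList (pvAgeBucketKeys.map (fun k => (k, 0))))
    -- slot[bucket] += 1 mutates the entry of d' at sev (present after setdefault)
    d'.modify sev (PySem.Dict.ofList (pvAgeBucketKeys.map (fun k => (k, 0))))
      (fun slot => slot.modify bucket 0 (· + 1))

def bucket_problems_by_age_py (problems : List (List (String × Int))) (now : Int) : List (Int × List (String × Int)) :=
  let by_sev := problems.foldl (pvStepA now) PySem.Dict.empty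
  by_sev.items.map (fun sv => (sv.1, sv.2.items))

-- ===== PORT B =====
-- first pass: collect the valid (severity, age) pairs (ages.append in Source B)
def pvStepAges (now : Int) (acc : List (Int × Int)) (p : List (String × Int)) : List (Int × Int) :=
  let sev := (PySem.Dict.ofList p).getD "severity" 0
  let clock := (PySem.Dict.ofList p).getD "clock" 0
  if clock > 0 then acc ++ [(sev, now - clock)] else acc

-- B's row(s): cumulative below-threshold counts over this severity's ages, then differences
def pvRowB (ages : List (Int × Int)) (s : Int) : List (String × Int) :=
  let sa := (ages.filter (fun q => q.1 == s)).map Prod.snd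
  let c1 := ((sa.countP (fun a => a < 86400) : Nat) : Int)
  let c2 := ((sa.countP (fun a => a < 259200) : Nat) : Int)
  let c3 := ((sa.countP (fun a => a < 604800) : Nat) : Int)
  [("<1d", c1), ("1-3d", c2 - c1), ("3-7d", c3 - c2), ("7d+", ((sa.length : Nat) : Int) - c3)]

def bucket_problems_by_age_py_alt (problems : List (List (String × Int))) (now : Int) : List (Int × List (String × Int)) :=
  let ages := problems.foldl (pvStepAges now) []
  let order := PySem.List.dedup (ages.map Prod.fst)   -- list(dict.fromkeys(s for s, _ in ages))
  -- the dict comprehension {s: row(s) for s in order}: order is distinct, so the dict is this assoc list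
  order.map (fun s => (s, pvRowB ages s))

-- ===== PRECONDITION & SPEC =====
def Spec_bucket_problems_by_age_py (problems : List (List (String × Int))) (now : Int) (out : List (Int × List (String × Int))) : Prop := out = bucket_problems_by_age_py_alt problems now
instance (problems : List (List (String × Int))) (now : Int) (out : List (Int × List (String × Int))) : Decidable (Spec_bucket_problems_by_age_py problems now out) := by unfold Spec_bucket_problems_by_age_py; infer_instance

-- ===== CLAIM (what is proved, stated in full; the proofs are below) =====
def Claim_equal_bucket_problems_by_age_py : Prop := ∀ (problems : List (List (String × Int))) (now : Int), Dom_bucket_problems_by_age_py problems now → Spec_bucket_problems_by_age_py problems now (bucket_problems_by_age_py problems now)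

-- ===== LEMMAS AND PROOFS =====

-- the bucket label of an age (A's inner loop closed out)
def pvBk (age : Int) : String :=
  if age < 86400 then "<1d" else if age < 259200 then "1-3d"
  else if age < 604800 then "3-7d" else "7d+"

-- extraction of the valid (severity, age) pair of one record (none = skipped record)
def pvExtractAge (now : Int) (p : List (String × Int)) : Option (Int × Int) :=
  let sev := (PySem.Dict.ofList p).getD "severity" 0
  let clock := (PySem.Dict.ofList p).getD "clock" 0
  if clock > 0 then some (sev, now - clock) else none

def pvExtract (now : Int) (p : List (String × Int)) : Option (Int × String) :=
  (pvExtractAge now p).map (fun q => (q.1, pvBk q.2))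

-- the canonical result both ports compute
def pvRow (l : List (Int × String)) (s : Int) : List (String × Int) :=
  pvAgeBucketKeys.map (fun k => (k, (l.count (s, k) : Int)))

def pvCanon (l : List (Int × String)) : List (Int × List (String × Int)) :=
  (PySem.List.dedup (l.map Prod.fst)).map (fun s => (s, pvRow l s))

lemma pvFindBucket_eq (age : Int) : pvFindBucket age pvAgeBuckets = pvBk age := by
  norm_num [pvFindBucket, pvAgeBuckets, pvBk]

-- facts about dicts whose items are a pair-map over a key list
lemma pv_contains_mapPair {a b : Type} [DecidableEq a] (xs : List a) (f : a -> b) (s : a) :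
    (PySem.Dict.mk (xs.map (fun x => (x, f x)))).contains s = true ↔ s ∈ xs := by
  induction xs with
  | nil => simp [PySem.Dict.contains]
  | cons x xs ih =>
    by_cases hx : x = s
    · subst hx; simp [PySem.Dict.contains]
    · have hx' : ¬ (s = x) := fun e => hx e.symm
      simp only [PySem.Dict.contains, List.map_cons, List.any_cons] at ih ⊢
      simp [hx, hx']

lemma pv_find?_mapPair {a b : Type} [DecidableEq a] (xs : List a) (f : a -> b) (s : a)
    (h : s ∈ xs) :
    (xs.map (fun x => (x, f x))).find? (fun q => q.1 == s) = some (s, f s) := by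
  induction xs with
  | nil => simp at h
  | cons x xs ih =>
    by_cases he : x = s
    · subst he; simp
    · have hx : s ∈ xs := by
        rcases List.mem_cons.mp h with h' | h'
        · exact absurd h'.symm he
        · exact h'
      simp [he, ih hx]

lemma pv_find?_mapPair_none {a b : Type} [DecidableEq a] (xs : List a) (f : a -> b) (s : a)
    (h : s ∉ xs) :
    (xs.map (fun x => (x, f x))).find? (fun q => q.1 == s) = none := by
  induction xs with
  | nil => simp
  | cons x xs ih =>
    have he : x ≠ s := fun e => h (e ▸ List.mem_cons_self ..)
    have hb : (x == s) = false := by simpa using he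
    simp only [List.map_cons, List.find?_cons]
    simp [hb, ih (fun hm => h (List.mem_cons_of_mem _ hm))]

lemma pv_getD_mapPair {a b : Type} [DecidableEq a] (xs : List a) (f : a -> b) (s : a) (d : b)
    (h : s ∈ xs) :
    (PySem.Dict.mk (xs.map (fun x => (x, f x)))).getD s d = f s := by
  simp [PySem.Dict.getD, PySem.Dict.get?, pv_find?_mapPair xs f s h]

lemma pv_insert_mapPair {a b : Type} [DecidableEq a] (xs : List a) (f : a -> b) (s : a) (v : b)
    (h : s ∈ xs) :
    (PySem.Dict.mk (xs.map (fun x => (x, f x)))).insert s v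
      = PySem.Dict.mk (xs.map (fun x => (x, if x = s then v else f x))) := by
  have hc : (PySem.Dict.mk (xs.map (fun x => (x, f x)))).contains s = true :=
    (pv_contains_mapPair xs f s).mpr h
  simp only [PySem.Dict.insert, hc, if_true]
  congr 1
  rw [List.map_map]
  refine List.map_congr_left (fun x _ => ?_)
  by_cases hx : x = s <;> simp [hx]

lemma pv_insert_append {a b : Type} [DecidableEq a] (xs : List a) (f : a -> b) (s : a)
    (w v : b) (h : s ∉ xs) :
    (PySem.Dict.mk (xs.map (fun x => (x, f x)) ++ [(s, w)])).insert s v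
      = PySem.Dict.mk (xs.map (fun x => (x, f x)) ++ [(s, v)]) := by
  have hc : (PySem.Dict.mk (xs.map (fun x => (x, f x)) ++ [(s, w)])).contains s = true := by
    simp [PySem.Dict.contains]
  simp only [PySem.Dict.insert, hc, if_true]
  congr 1
  rw [List.map_append, List.map_map]
  congr 1
  · refine List.map_congr_left (fun x hx => ?_)
    have : x ≠ s := fun e => h (e ▸ hx)
    simp [this]
  · simp

lemma pv_dedup_append_singleton {a : Type} [BEq a] [LawfulBEq a] (l : List a) (x : a) :
    PySem.List.dedup (l ++ [x])
      = if x ∈ l then PySem.List.dedup l else PySem.List.dedup l ++ [x] := by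
  have h1 : PySem.List.dedup (l ++ [x]) = PySem.Set.add (PySem.List.dedup l) x := by
    simp [PySem.List.dedup, PySem.Set.ofList, List.foldl_append]
  have hc : ((PySem.List.dedup l).contains x = true) ↔ x ∈ l := by
    rw [List.contains_iff_mem, PySem.List.dedup_eq_ofList]
    exact PySem.Set.mem_ofList l x
  rw [h1]
  unfold PySem.Set.add PySem.Set.contains
  by_cases h : x ∈ l
  · rw [if_pos (hc.mpr h), if_pos h]
  · rw [if_neg (fun hcn => h (hc.mp hcn)), if_neg h]

-- counting after appending one pair
lemma pv_count_append (l : List (Int × String)) (s : Int) (b : String) (t : Int) (k : String) :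
    ((l ++ [(s, b)]).count (t, k) : Int)
      = (l.count (t, k) : Int) + (if t = s ∧ k = b then 1 else 0) := by
  rw [List.count_append]
  by_cases h : t = s ∧ k = b
  · obtain ⟨rfl, rfl⟩ := h; simp
  · have hne : ¬ ((s, b) = (t, k)) := by
      rintro ⟨rfl, rfl⟩; exact h ⟨rfl, rfl⟩
    simp [hne, h]

lemma pv_count_zero (l : List (Int × String)) (s : Int) (k : String)
    (h : s ∉ l.map Prod.fst) :
    l.count (s, k) = 0 := by
  rw [List.count_eq_zero]
  intro hm
  exact h (List.mem_map_of_mem (f := Prod.fst) hm)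

-- the A-side fold over the extracted pairs computes the canonical nested dict
lemma pvAFold (l : List (Int × String)) (hb : ∀ p ∈ l, p.2 ∈ pvAgeBucketKeys) :
    l.foldl (fun d sb =>
        (d.setdefault sb.1 (PySem.Dict.ofList (pvAgeBucketKeys.map (fun k => (k, 0))))).modify sb.1
          (PySem.Dict.ofList (pvAgeBucketKeys.map (fun k => (k, 0))))
          (fun slot => slot.modify sb.2 0 (· + 1))) PySem.Dict.empty
      = PySem.Dict.mk ((PySem.List.dedup (l.map Prod.fst)).map
          (fun s => (s, PySem.Dict.mk (pvRow l s)))) := by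
  induction l using List.reverseRecOn with
  | nil => rfl
  | append_singleton l p ih =>
    obtain ⟨s, b⟩ := p
    have hb' : ∀ q ∈ l, q.2 ∈ pvAgeBucketKeys := fun q hq => hb q (List.mem_append_left _ hq)
    have hbmem : b ∈ pvAgeBucketKeys := by
      simpa using hb (s, b) (List.mem_append_right _ (List.mem_cons_self ..))
    rw [List.foldl_append, List.foldl_cons, List.foldl_nil, ih hb']
    dsimp only
    have hslot0 : PySem.Dict.ofList (pvAgeBucketKeys.map (fun k => (k, 0)))
        = PySem.Dict.mk (pvAgeBucketKeys.map (fun k => (k, (0 : Int)))) := by decide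
    have hmemsevs : s ∈ PySem.List.dedup (l.map Prod.fst) ↔ s ∈ l.map Prod.fst := by
      rw [PySem.List.dedup_eq_ofList]; exact PySem.Set.mem_ofList _ _
    rw [hslot0]
    by_cases hs : s ∈ l.map Prod.fst
    · -- severity already present: setdefault is the identity
      have hcont : (PySem.Dict.mk ((PySem.List.dedup (l.map Prod.fst)).map
          (fun t => (t, PySem.Dict.mk (pvRow l t))))).contains s = true :=
        (pv_contains_mapPair _ _ _).mpr (hmemsevs.mpr hs)
      simp only [PySem.Dict.setdefault, hcont, if_true]
      simp only [PySem.Dict.modify]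
      rw [pv_getD_mapPair _ _ _ _ (hmemsevs.mpr hs)]
      rw [pvRow, pv_getD_mapPair _ _ _ _ hbmem, pv_insert_mapPair _ _ _ _ hbmem]
      rw [pv_insert_mapPair _ _ _ _ (hmemsevs.mpr hs)]
      have hded : PySem.List.dedup ((l ++ [(s, b)]).map Prod.fst)
          = PySem.List.dedup (l.map Prod.fst) := by
        rw [List.map_append, List.map_singleton, pv_dedup_append_singleton, if_pos hs]
      rw [hded]
      congr 1
      refine List.map_congr_left (fun t ht => ?_)
      by_cases hts : t = s
      · subst hts
        rw [if_pos rfl]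
        congr 1
        congr 1
        rw [pvRow]
        refine List.map_congr_left (fun k _ => ?_)
        rw [pv_count_append]
        by_cases hkb : k = b <;> simp [hkb]
      · rw [if_neg hts]
        congr 2
        rw [pvRow, pvRow]
        refine List.map_congr_left (fun k _ => ?_)
        rw [pv_count_append]
        simp [hts]
    · -- new severity: setdefault appends a fresh zero row
      have hcont : (PySem.Dict.mk ((PySem.List.dedup (l.map Prod.fst)).map
          (fun t => (t, PySem.Dict.mk (pvRow l t))))).contains s = false := by
        rw [← Bool.not_eq_true]
        intro hcn
        exact hs (hmemsevs.mp ((pv_contains_mapPair _ _ _).mp hcn))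
      simp only [PySem.Dict.setdefault, hcont, Bool.false_eq_true, if_false]
      simp only [PySem.Dict.modify]
      have hget : (PySem.Dict.mk ((PySem.List.dedup (l.map Prod.fst)).map
            (fun t => (t, PySem.Dict.mk (pvRow l t)))
            ++ [(s, PySem.Dict.mk (pvAgeBucketKeys.map (fun k => (k, (0 : Int)))))])).getD s
            (PySem.Dict.mk (pvAgeBucketKeys.map (fun k => (k, (0 : Int)))))
          = PySem.Dict.mk (pvAgeBucketKeys.map (fun k => (k, (0 : Int)))) := by
        have hfn := pv_find?_mapPair_none (PySem.List.dedup (l.map Prod.fst))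
          (fun t => PySem.Dict.mk (pvRow l t)) s (fun hm => hs (hmemsevs.mp hm))
        simp only [PySem.Dict.getD, PySem.Dict.get?, List.find?_append, hfn]
        simp
      rw [hget]
      rw [pv_getD_mapPair _ _ _ _ hbmem, pv_insert_mapPair _ _ _ _ hbmem]
      rw [pv_insert_append _ _ _ _ _ (fun hm => hs (hmemsevs.mp hm))]
      have hded : PySem.List.dedup ((l ++ [(s, b)]).map Prod.fst)
          = PySem.List.dedup (l.map Prod.fst) ++ [s] := by
        rw [List.map_append, List.map_singleton, pv_dedup_append_singleton, if_neg hs]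
      rw [hded, List.map_append, List.map_singleton]
      congr 1
      congr 1
      · refine List.map_congr_left (fun t ht => ?_)
        have hts : t ≠ s := by
          intro e; subst e
          exact hs (hmemsevs.mp ht)
        congr 2
        rw [pvRow, pvRow]
        refine List.map_congr_left (fun k _ => ?_)
        rw [pv_count_append]
        simp [hts]
      · congr 2
        congr 1
        rw [pvRow]
        refine List.map_congr_left (fun k _ => ?_)
        rw [pv_count_append, pv_count_zero l s k hs]
        by_cases hkb : k = b <;> simp [hkb]

lemma pvA_bridge (problems : List (List (String × Int))) (now : Int) :
    problems.foldl (pvStepA now) PySem.Dict.empty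
      = (problems.filterMap (pvExtract now)).foldl (fun d sb =>
        (d.setdefault sb.1 (PySem.Dict.ofList (pvAgeBucketKeys.map (fun k => (k, 0))))).modify sb.1
          (PySem.Dict.ofList (pvAgeBucketKeys.map (fun k => (k, 0))))
          (fun slot => slot.modify sb.2 0 (· + 1))) PySem.Dict.empty := by
  rw [List.foldl_filterMap]
  congr 1
  funext d p
  by_cases h : (PySem.Dict.ofList p).getD "clock" 0 ≤ 0
  · simp [pvStepA, pvExtract, pvExtractAge, h, not_lt.mpr h]
  · simp [pvStepA, pvExtract, pvExtractAge, h, lt_of_not_ge h, pvFindBucket_eq]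

lemma pvA_canon (problems : List (List (String × Int))) (now : Int) :
    bucket_problems_by_age_py problems now = pvCanon (problems.filterMap (pvExtract now)) := by
  simp only [bucket_problems_by_age_py]
  rw [pvA_bridge]
  have hbAll : ∀ q ∈ problems.filterMap (pvExtract now), q.2 ∈ pvAgeBucketKeys := by
    intro q hq
    rcases List.mem_filterMap.mp hq with ⟨p, _, hp⟩
    simp only [pvExtract] at hp
    rcases Option.map_eq_some_iff.mp hp with ⟨r, _, hfr⟩
    subst hfr
    simp only [pvBk]
    split_ifs <;> simp [pvAgeBucketKeys]
  rw [pvAFold _ hbAll]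
  simp [pvCanon, List.map_map, Function.comp]

-- B's ages pass equals the filterMap of pvExtractAge
lemma pvAges_fold (problems : List (List (String × Int))) (now : Int) (acc : List (Int × Int)) :
    problems.foldl (pvStepAges now) acc = acc ++ problems.filterMap (pvExtractAge now) := by
  induction problems generalizing acc with
  | nil => simp
  | cons p ps ih =>
    rw [List.foldl_cons, ih]
    by_cases h : (PySem.Dict.ofList p).getD "clock" 0 > 0
    · simp [pvStepAges, pvExtractAge, h]
    · simp [pvStepAges, pvExtractAge, h]

-- the labeled pairs are the ages pairs with the bucket label applied
lemma pvExtract_map (problems : List (List (String × Int))) (now : Int) :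
    problems.filterMap (pvExtract now)
      = (problems.filterMap (pvExtractAge now)).map (fun q => (q.1, pvBk q.2)) := by
  rw [List.map_filterMap]
  rfl

-- splitting a countP along an implied sub-predicate
lemma pv_countP_split_nat (l : List Int) (p q : Int → Bool) (h : ∀ a, q a → p a) :
    l.countP p = l.countP q + l.countP (fun a => p a && !q a) := by
  induction l with
  | nil => simp
  | cons x xs ih =>
    simp only [List.countP_cons, ih]
    by_cases hq : q x
    · simp only [hq, h x hq, Bool.not_true, Bool.and_false, if_true, Bool.false_eq_true, if_false]
      omega
    · by_cases hp : p x <;>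
        simp only [hp, hq, Bool.not_false, Bool.and_true, if_true, if_false,
          Bool.false_eq_true] <;> omega

-- splitting a countP along an implied sub-predicate
lemma pv_countP_split (l : List Int) (p q : Int → Bool) (h : ∀ a, q a → p a) :
    ((l.countP p : Nat) : Int)
      = ((l.countP q : Nat) : Int) + ((l.countP (fun a => p a && !q a) : Nat) : Int) := by
  rw [pv_countP_split_nat l p q h]
  push_cast
  ring

-- count of a labeled pair equals a countP over this severity's ages
lemma pv_count_label (ages : List (Int × Int)) (s : Int) (k : String) :
    ((((ages.map (fun q => (q.1, pvBk q.2))).count (s, k)) : Nat) : Int)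
      = ((((ages.filter (fun q => q.1 == s)).map Prod.snd).countP
          (fun a => pvBk a == k) : Nat) : Int) := by
  congr 1
  rw [List.count_eq_countP, List.countP_map, List.countP_map, List.countP_filter]
  refine List.countP_congr (fun q _ => ?_)
  by_cases h1 : q.1 = s <;> by_cases h2 : pvBk q.2 = k <;>
    simp [h1, h2, Function.comp, Prod.ext_iff]

lemma pvRowB_eq (ages : List (Int × Int)) (s : Int) :
    pvRowB ages s = pvRow (ages.map (fun q => (q.1, pvBk q.2))) s := by
  simp only [pvRow, pvAgeBucketKeys, List.map_cons, List.map_nil, pvRowB]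
  have hlab := pv_count_label ages s
  set sa := (ages.filter (fun q => q.1 == s)).map Prod.snd with hsa
  have e1 : ∀ a : Int, (pvBk a == "<1d") = (a < 86400 : Bool) := by
    intro a; simp only [pvBk]; split_ifs <;> simp_all
  have e2 : ∀ a : Int, (pvBk a == "1-3d") = ((a < 259200 : Bool) && !(a < 86400 : Bool)) := by
    intro a; simp only [pvBk]; split_ifs <;> simp_all
  have e3 : ∀ a : Int, (pvBk a == "3-7d") = ((a < 604800 : Bool) && !(a < 259200 : Bool)) := by
    intro a; simp only [pvBk]; split_ifs <;> simp_all <;> omega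
  have e4 : ∀ a : Int, (pvBk a == "7d+") = (true && !(a < 604800 : Bool)) := by
    intro a; simp only [pvBk]; split_ifs <;> simp_all <;> omega
  have h1 := hlab "<1d"; have h2 := hlab "1-3d"; have h3 := hlab "3-7d"; have h4 := hlab "7d+"
  rw [List.countP_congr (fun a _ => by rw [e1 a])] at h1
  rw [List.countP_congr (fun a _ => by rw [e2 a])] at h2
  rw [List.countP_congr (fun a _ => by rw [e3 a])] at h3
  rw [List.countP_congr (fun a _ => by rw [e4 a])] at h4
  have s12 := pv_countP_split sa (fun a => (a < 259200 : Bool)) (fun a => (a < 86400 : Bool))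
    (by intro a ha; simp at ha ⊢; omega)
  have s23 := pv_countP_split sa (fun a => (a < 604800 : Bool)) (fun a => (a < 259200 : Bool))
    (by intro a ha; simp at ha ⊢; omega)
  have s3t := pv_countP_split sa (fun _ => true) (fun a => (a < 604800 : Bool))
    (by intro a _; rfl)
  have hlen : sa.countP (fun _ => true) = sa.length := by simp
  rw [hlen] at s3t
  beta_reduce at s12 s23 s3t
  simp only [List.cons.injEq, Prod.mk.injEq, and_true, true_and]
  refine ⟨h1.symm, ?_, ?_, ?_⟩
  · omega
  · omega
  · omega

lemma pvB_canon (problems : List (List (String × Int))) (now : Int) :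
    bucket_problems_by_age_py_alt problems now = pvCanon (problems.filterMap (pvExtract now)) := by
  simp only [bucket_problems_by_age_py_alt]
  rw [pvAges_fold problems now [], List.nil_append, pvExtract_map, pvCanon]
  have hfst : ((problems.filterMap (pvExtractAge now)).map (fun q => (q.1, pvBk q.2))).map Prod.fst
      = (problems.filterMap (pvExtractAge now)).map Prod.fst := by
    rw [List.map_map]; rfl
  rw [hfst]
  exact List.map_congr_left (fun s _ => by rw [pvRowB_eq])

-- ===== VERDICT (by name: the statement is the Claim_ definition above) =====
theorem bucket_problems_by_age_py_spec : Claim_equal_bucket_problems_by_age_py := by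
  intro problems now _
  show _ = _
  rw [pvA_canon, pvB_canon]
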